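-- pv_equiv track=rewrite | github.com/samyama-ai/clinicaltrials-kg | nsclc/brief.py | _why_relevant
-- ===== SOURCE A (Python) =====
-- from typing import Any
--
-- _MODALITY_ORDER: tuple[str, ...] = (
--     "targeted_therapy",
--     "immunotherapy",
--     "chemotherapy",
--     "radiotherapy",
--     "antiangiogenic",
--     "hormonal_therapy",
-- )
--
-- def _why_relevant(rec: dict[str, Any]) -> str:
--     """First matching modality (from a canonical order) or ``untagged``."""
--     mods = set(rec.get("modalities") or [])
--     for m in _MODALITY_ORDER:
--         if m in mods:
--             return m
--     # If the record has modalities not in our canonical order, report the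
--     # first alphabetically-sorted one so the label is still informative.
--     if mods:
--         return sorted(mods)[0]
--     return "untagged"
-- ===== SOURCE B (Python) =====
-- _MODALITY_ORDER: tuple[str, ...] = (
--     "targeted_therapy",
--     "immunotherapy",
--     "chemotherapy",
--     "radiotherapy",
--     "antiangiogenic",
--     "hormonal_therapy",
-- )
--
-- _RANK = {m: i for i, m in enumerate(_MODALITY_ORDER)}
--
-- def _why_relevant(rec):
--     """Single keyed min over the modality set instead of scan-then-sort."""
--     mods = set(rec.get("modalities") or [])
--     if not mods:
--         return "untagged"
--     n = len(_MODALITY_ORDER)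
--     return min(mods, key=lambda m: (_RANK.get(m, n), m))
-- ===== Notes on version B (the rewrite author's own statement) =====
-- stated objective: simpler
-- what changed: A scans the canonical order and, failing that, sorts the whole modality set and takes its head; B makes one keyed pass, taking min(mods, key=(canonical rank, name)) with a single shared fallback rank for non-canonical modalities.
import Mathlib
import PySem

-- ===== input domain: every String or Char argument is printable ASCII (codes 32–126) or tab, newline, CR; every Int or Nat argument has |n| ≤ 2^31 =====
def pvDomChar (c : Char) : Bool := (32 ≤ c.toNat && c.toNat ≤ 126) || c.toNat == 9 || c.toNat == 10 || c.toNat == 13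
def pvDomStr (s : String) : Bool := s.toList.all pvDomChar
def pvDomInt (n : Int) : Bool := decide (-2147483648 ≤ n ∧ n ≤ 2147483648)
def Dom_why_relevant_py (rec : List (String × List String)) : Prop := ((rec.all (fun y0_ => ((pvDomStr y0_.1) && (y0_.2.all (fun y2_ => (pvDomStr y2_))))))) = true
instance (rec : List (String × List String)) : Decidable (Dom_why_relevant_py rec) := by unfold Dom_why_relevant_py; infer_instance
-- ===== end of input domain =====

-- B replaces A's two-phase "scan the canonical order, then sort the leftovers" with a
-- single keyed min over the modality set (objective: simpler — one pass, one rule).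

-- ===== PORT A =====
def modalityOrder : List String :=
  ["targeted_therapy", "immunotherapy", "chemotherapy", "radiotherapy",
   "antiangiogenic", "hormonal_therapy"]

-- the 'for m in _MODALITY_ORDER: if m in mods: return m' loop
def whyLoopA (order : List String) (mods : PySem.Set String) : Option String :=
  match order with
  | [] => none
  | m :: rest => if PySem.Set.contains mods m then some m else whyLoopA rest mods

def why_relevant_py (rec : List (String × List String)) : String :=
  let mods : PySem.Set String :=
    PySem.Set.ofList (((PySem.Dict.mk rec).get? "modalities").getD [])
  match whyLoopA modalityOrder mods with
  | some m => m
  | none =>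
    if mods ≠ [] then
      -- sorted(mods)[0]; the none branch is unreachable here since mods ≠ []
      match PySem.List.pyGet? (PySem.List.sorted mods (fun x => x) false) 0 with
      | some x => x
      | none => ""
    else "untagged"

-- ===== PORT B =====
-- _RANK = {m: i for i, m in enumerate(_MODALITY_ORDER)}
def rankDict : PySem.Dict String Int :=
  (PySem.List.enumerate modalityOrder 0).foldl
    (fun d p => d.insert p.2 p.1) PySem.Dict.empty

def why_relevant_py_alt (rec : List (String × List String)) : String :=
  let mods : PySem.Set String :=
    PySem.Set.ofList (((PySem.Dict.mk rec).get? "modalities").getD [])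
  if mods = [] then "untagged"
  else
    -- min(mods, key=lambda m: (_RANK.get(m, n), m)); none branch unreachable (mods ≠ [])
    match PySem.List.min2? mods
        (fun m => rankDict.getD m (modalityOrder.length : Int)) (fun m => m) with
    | some m => m
    | none => ""

-- ===== PRECONDITION & SPEC =====
def Spec_why_relevant_py (rec : List (String × List String)) (out : String) : Prop := out = why_relevant_py_alt rec
instance (rec : List (String × List String)) (out : String) : Decidable (Spec_why_relevant_py rec out) := by unfold Spec_why_relevant_py; infer_instance

-- ===== CLAIM (what is proved, stated in full; the proofs are below) =====
def Claim_equal_why_relevant_py : Prop := ∀ (rec : List (String × List String)), Dom_why_relevant_py rec → Spec_why_relevant_py rec (why_relevant_py rec)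

-- ===== LEMMAS AND PROOFS =====

-- the rank lookup as a plain if-chain
set_option maxRecDepth 4096 in
theorem rank_eq (y : String) :
    rankDict.getD y (modalityOrder.length : Int) =
      if y = "targeted_therapy" then 0 else if y = "immunotherapy" then 1
      else if y = "chemotherapy" then 2 else if y = "radiotherapy" then 3
      else if y = "antiangiogenic" then 4 else if y = "hormonal_therapy" then 5
      else 6 := by
  have h : rankDict = PySem.Dict.mk [("targeted_therapy",0),("immunotherapy",1),("chemotherapy",2),("radiotherapy",3),("antiangiogenic",4),("hormonal_therapy",5)] := by decide
  rw [h]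
  simp only [PySem.Dict.getD, PySem.Dict.get?_mk_cons, modalityOrder, beq_iff_eq]
  by_cases h1 : y = "targeted_therapy" <;> by_cases h2 : y = "immunotherapy" <;> by_cases h3 : y = "chemotherapy" <;> by_cases h4 : y = "radiotherapy" <;> by_cases h5 : y = "antiangiogenic" <;> by_cases h6 : y = "hormonal_therapy" <;> simp only [h1,h2,h3,h4,h5,h6] <;> subst_vars <;> simp_all
  rw [if_neg (fun hh => h1 hh.symm), if_neg (fun hh => h2 hh.symm), if_neg (fun hh => h3 hh.symm),
      if_neg (fun hh => h4 hh.symm), if_neg (fun hh => h5 hh.symm), if_neg (fun hh => h6 hh.symm)]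
  simp [PySem.Dict.get?]

-- the foldl invariant behind min(..., key): a strict lexicographic least element wins
theorem min2Go {α : Type} (k1 : α → Int) (k2 : α → String) (m₀ : α)
    (xs : List α) : ∀ (acc : Option α),
    (∀ y ∈ xs, y = m₀ ∨ k1 m₀ < k1 y ∨ (k1 m₀ = k1 y ∧ k2 m₀ < k2 y)) →
    (m₀ ∈ xs ∨ acc = some m₀) →
    (acc = none ∨ ∃ m, acc = some m ∧ (m = m₀ ∨ k1 m₀ < k1 m ∨ (k1 m₀ = k1 m ∧ k2 m₀ < k2 m))) →
    List.foldl
      (fun acc x =>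
        match acc with
        | none => some x
        | some m =>
          if (decide (k1 x < k1 m) || !decide (k1 m < k1 x) && decide (k2 x < k2 m)) = true
          then some x else some m)
      acc xs = some m₀ := by
  induction xs with
  | nil =>
    intro acc _ hmem hacc
    simp only [List.foldl_nil]
    rcases hmem with h | h
    · simp at h
    · exact h
  | cons x rest ih =>
    intro acc hall hmem hacc
    simp only [List.foldl_cons]
    have hx := hall x (by simp)
    have hall' : ∀ y ∈ rest, y = m₀ ∨ k1 m₀ < k1 y ∨ (k1 m₀ = k1 y ∧ k2 m₀ < k2 y) :=
      fun y hy => hall y (by simp [hy])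
    rcases hacc with rfl | ⟨m, rfl, hm⟩
    · -- acc = none: new acc = some x
      apply ih (some x) hall'
      · rcases hx with rfl | hx
        · right; rfl
        · left
          have hmem' : m₀ ∈ x :: rest := by
            rcases hmem with h | h
            · exact h
            · exact absurd h (by simp)
          rcases List.mem_cons.mp hmem' with rfl | h
          · exfalso; rcases hx with h | ⟨h, h2⟩
            · exact lt_irrefl _ h
            · exact lt_irrefl _ h2
          · exact h
      · exact Or.inr ⟨x, rfl, by tauto⟩
    · -- acc = some m
      by_cases hc : (decide (k1 x < k1 m) || !decide (k1 m < k1 x) && decide (k2 x < k2 m)) = true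
      · simp only [hc, if_pos]
        apply ih (some x) hall'
        · rcases hx with rfl | hx
          · right; rfl
          · left
            rcases hmem with hmem | hmem
            · rcases List.mem_cons.mp hmem with rfl | h
              · exfalso; rcases hx with h | ⟨h, h2⟩
                · exact lt_irrefl _ h
                · exact lt_irrefl _ h2
              · exact h
            · -- acc = some m₀, m = m₀, but condition picked x; x must be m₀ or strict-greater
              -- if m = m₀ and strict m₀ x, condition is false: contradiction
              exfalso
              have hmm : m = m₀ := by injection hmem
              subst hmm
              simp only [Bool.or_eq_true, Bool.and_eq_true, Bool.not_eq_true', decide_eq_true_eq, decide_eq_false_iff_not] at hc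
              rcases hx with h1 | ⟨h1, h2⟩
              · rcases hc with h | ⟨h3, h4⟩
                · exact absurd h1 (not_lt.mpr h.le)
                · exact h3 h1
              · rcases hc with h | ⟨h3, h4⟩
                · exact absurd h (by omega)
                · exact absurd h2 (not_lt.mpr h4.le)
        · exact Or.inr ⟨x, rfl, by tauto⟩
      · simp only [if_neg hc]
        apply ih (some m) hall'
        · rcases hmem with hmem | hmem
          · rcases List.mem_cons.mp hmem with rfl | h
            · -- x = m₀ but condition kept m; then m = m₀ (else strict m₀ m makes cond true)
              rcases hm with rfl | hm
              · right; rfl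
              · exfalso
                apply hc
                simp only [Bool.or_eq_true, Bool.and_eq_true, Bool.not_eq_true', decide_eq_true_eq, decide_eq_false_iff_not]
                rcases hm with h1 | ⟨h1, h2⟩
                · exact Or.inl h1
                · exact Or.inr ⟨by omega, h2⟩
            · exact Or.inl h
          · right; exact hmem
        · exact Or.inr ⟨m, rfl, hm⟩

theorem min2?_eq_of_least {α : Type} (xs : List α) (k1 : α → Int) (k2 : α → String)
    (m₀ : α) (hm : m₀ ∈ xs)
    (hlt : ∀ y ∈ xs, y ≠ m₀ → k1 m₀ < k1 y ∨ (k1 m₀ = k1 y ∧ k2 m₀ < k2 y)) :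
    PySem.List.min2? xs k1 k2 = some m₀ := by
  unfold PySem.List.min2?
  apply min2Go k1 k2 m₀ xs none
  · intro y hy
    by_cases h : y = m₀
    · exact Or.inl h
    · exact Or.inr (hlt y hy h)
  · exact Or.inl hm
  · exact Or.inl rfl

-- B's side returns the unique strictly-least element
theorem altBody_eq (mods : List String) (m₀ : String) (hm : m₀ ∈ mods)
    (hlt : ∀ y ∈ mods, y ≠ m₀ →
      rankDict.getD m₀ (modalityOrder.length : Int) < rankDict.getD y (modalityOrder.length : Int) ∨
      (rankDict.getD m₀ (modalityOrder.length : Int) = rankDict.getD y (modalityOrder.length : Int) ∧ m₀ < y)) :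
    (if mods = [] then "untagged"
     else match PySem.List.min2? mods
        (fun m => rankDict.getD m (modalityOrder.length : Int)) (fun m => m) with
      | some m => m
      | none => "") = m₀ := by
  have hne : mods ≠ [] := by rintro rfl; simp at hm
  rw [if_neg hne, min2?_eq_of_least mods _ _ m₀ hm hlt]

set_option maxHeartbeats 1000000 in
theorem core (mods : List String) :
    (match whyLoopA modalityOrder mods with
     | some m => m
     | none =>
       if mods ≠ [] then
         match PySem.List.pyGet? (PySem.List.sorted mods (fun x => x) false) 0 with
         | some x => x
         | none => ""
       else "untagged")
    = (if mods = [] then "untagged"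
       else match PySem.List.min2? mods
          (fun m => rankDict.getD m (modalityOrder.length : Int)) (fun m => m) with
        | some m => m
        | none => "") := by
  simp only [whyLoopA, modalityOrder]
  by_cases h1 : PySem.Set.contains mods "targeted_therapy" = true
  · have hm : "targeted_therapy" ∈ mods := by simpa [PySem.Set.contains] using h1
    rw [if_pos h1]
    refine (altBody_eq mods _ hm ?_).symm
    intro y hy hne
    rw [rank_eq, rank_eq]
    split_ifs with e1 e2 e3 e4 e5 e6 <;> first | omega | (subst_vars; simp_all [PySem.Set.contains])
  by_cases h2 : PySem.Set.contains mods "immunotherapy" = true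
  · have hm : "immunotherapy" ∈ mods := by simpa [PySem.Set.contains] using h2
    rw [if_neg h1, if_pos h2]
    refine (altBody_eq mods _ hm ?_).symm
    intro y hy hne
    rw [rank_eq, rank_eq]
    split_ifs with e1 e2 e3 e4 e5 e6 <;> first | omega | (subst_vars; simp_all [PySem.Set.contains])
  by_cases h3 : PySem.Set.contains mods "chemotherapy" = true
  · have hm : "chemotherapy" ∈ mods := by simpa [PySem.Set.contains] using h3
    rw [if_neg h1, if_neg h2, if_pos h3]
    refine (altBody_eq mods _ hm ?_).symm
    intro y hy hne
    rw [rank_eq, rank_eq]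
    split_ifs with e1 e2 e3 e4 e5 e6 <;> first | omega | (subst_vars; simp_all [PySem.Set.contains])
  by_cases h4 : PySem.Set.contains mods "radiotherapy" = true
  · have hm : "radiotherapy" ∈ mods := by simpa [PySem.Set.contains] using h4
    rw [if_neg h1, if_neg h2, if_neg h3, if_pos h4]
    refine (altBody_eq mods _ hm ?_).symm
    intro y hy hne
    rw [rank_eq, rank_eq]
    split_ifs with e1 e2 e3 e4 e5 e6 <;> first | omega | (subst_vars; simp_all [PySem.Set.contains])
  by_cases h5 : PySem.Set.contains mods "antiangiogenic" = true
  · have hm : "antiangiogenic" ∈ mods := by simpa [PySem.Set.contains] using h5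
    rw [if_neg h1, if_neg h2, if_neg h3, if_neg h4, if_pos h5]
    refine (altBody_eq mods _ hm ?_).symm
    intro y hy hne
    rw [rank_eq, rank_eq]
    split_ifs with e1 e2 e3 e4 e5 e6 <;> first | omega | (subst_vars; simp_all [PySem.Set.contains])
  by_cases h6 : PySem.Set.contains mods "hormonal_therapy" = true
  · have hm : "hormonal_therapy" ∈ mods := by simpa [PySem.Set.contains] using h6
    rw [if_neg h1, if_neg h2, if_neg h3, if_neg h4, if_neg h5, if_pos h6]
    refine (altBody_eq mods _ hm ?_).symm
    intro y hy hne
    rw [rank_eq, rank_eq]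
    split_ifs with e1 e2 e3 e4 e5 e6 <;> first | omega | (subst_vars; simp_all [PySem.Set.contains])
  -- no canonical modality present
  rw [if_neg h1, if_neg h2, if_neg h3, if_neg h4, if_neg h5, if_neg h6]
  have hnc : ∀ z ∈ mods, rankDict.getD z (modalityOrder.length : Int) = 6 := by
    intro z hz
    rw [rank_eq]
    split_ifs with e1 e2 e3 e4 e5 e6 <;> first | rfl | (subst_vars; simp_all [PySem.Set.contains])
  by_cases hmm : mods = []
  · subst hmm; simp
  · have hsn : PySem.List.sorted mods (fun x => x) false ≠ [] := by
      simpa [PySem.List.sorted_eq_nil_iff] using hmm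
    cases hs : PySem.List.sorted mods (fun x => x) false with
    | nil => exact absurd hs hsn
    | cons x t =>
      have hxm : x ∈ mods := by
        have hx : x ∈ PySem.List.sorted mods (fun x => x) false := by rw [hs]; simp
        simpa [PySem.List.mem_sorted] using hx
      refine Eq.trans ?_ (altBody_eq mods x hxm ?_).symm
      · rw [if_pos hmm]
        simp [PySem.List.pyGet?, PySem.List.pyIdx?]
      · intro y hy hne
        refine Or.inr ⟨by rw [hnc x hxm, hnc y hy], ?_⟩
        have hle : x ≤ y := PySem.List.key_head_sorted_le mods (fun x => x) hs y hy
        exact lt_of_le_of_ne hle (fun e => hne e.symm)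

-- ===== VERDICT (by name: the statement is the Claim_ definition above) =====
theorem why_relevant_py_spec : Claim_equal_why_relevant_py := by
  intro rec _
  unfold Spec_why_relevant_py why_relevant_py why_relevant_py_alt
  exact core (PySem.Set.ofList (((PySem.Dict.mk rec).get? "modalities").getD []))
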